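/-
  The generic machinery on the model's flat user-mode machine starts here: this module only fixes the imports
  every other module of `UserX` shares.
-/
import X86.Derived.User.Step
import X86.Derived.User.Start
import X86.Derived.User.Frame
import X86.Derived.User.UndefFlags
import X86.Derived.Dec.Bridge
import X86.Derived.Dec.Find
import X86.Derived.Dec.Tactic
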